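-- pv_equiv track=rewrite | github.com/Ashrithakukkeshree/mtd_c_py | DAY4/p8.py | max_frames
-- ===== SOURCE A (Python) =====
-- from collections import Counter
--
-- def max_frames(sticks):
--     stick_counts = Counter(sticks)
--     pairs = 0
--     square_frames = 0
--
--     for length, count in stick_counts.items():
--         pairs += count // 2
--         square_frames += count // 4
--     frames = pairs // 2
--     return frames
-- ===== SOURCE B (Python) =====
-- def max_frames(sticks):
--     pairs = 0
--     run = 0
--     prev = None
--     for x in sorted(sticks):
--         if run and x == prev:
--             run += 1
--         else:
--             pairs += run // 2
--             run = 1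
--             prev = x
--     pairs += run // 2
--     return pairs // 2
-- ===== Notes on version B (the rewrite author's own statement) =====
-- stated objective: alternative
-- what changed: Replaces Counter hash aggregation (and the dead square_frames accumulator) with sorting a copy and scanning consecutive runs, adding run//2 per run.
import Mathlib
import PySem

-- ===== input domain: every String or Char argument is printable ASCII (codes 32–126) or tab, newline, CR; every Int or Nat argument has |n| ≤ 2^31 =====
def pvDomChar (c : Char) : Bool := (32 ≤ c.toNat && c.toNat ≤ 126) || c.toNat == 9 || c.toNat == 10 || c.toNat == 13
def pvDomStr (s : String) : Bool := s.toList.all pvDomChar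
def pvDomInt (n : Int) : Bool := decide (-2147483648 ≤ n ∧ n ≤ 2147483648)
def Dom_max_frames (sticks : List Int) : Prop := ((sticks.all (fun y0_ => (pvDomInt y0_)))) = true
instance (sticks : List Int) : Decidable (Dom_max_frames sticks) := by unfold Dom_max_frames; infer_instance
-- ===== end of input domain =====

-- B replaces A's Counter aggregation (and A's dead square_frames accumulator) with
-- sort-then-scan over runs of equal values; alternative decomposition, same results.

-- ===== PORT A =====
def max_frames (sticks : List Int) : Int :=
  let stick_counts := PySem.Dict.counter sticks
  let st := stick_counts.items.foldl
    (fun (acc : Int × Int) kv =>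
      (acc.1 + PySem.Int.floordiv kv.2 2, acc.2 + PySem.Int.floordiv kv.2 4)) (0, 0)
  PySem.Int.floordiv st.1 2

-- ===== PORT B =====
-- loop body of Source B: state (pairs, run, prev)
def bStep (st : Int × Int × Option Int) (x : Int) : Int × Int × Option Int :=
  if st.2.1 ≠ 0 ∧ st.2.2 = some x then (st.1, st.2.1 + 1, st.2.2)
  else (st.1 + PySem.Int.floordiv st.2.1 2, 1, some x)

def max_frames_alt (sticks : List Int) : Int :=
  let st := (PySem.List.sorted sticks (fun x => x) false).foldl bStep (0, 0, none)
  PySem.Int.floordiv (st.1 + PySem.Int.floordiv st.2.1 2) 2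

-- ===== PRECONDITION & SPEC =====
def Spec_max_frames (sticks : List Int) (out : Int) : Prop := out = max_frames_alt sticks
instance (sticks : List Int) (out : Int) : Decidable (Spec_max_frames sticks out) := by unfold Spec_max_frames; infer_instance

-- ===== CLAIM (what is proved, stated in full; the proofs are below) =====
def Claim_equal_max_frames : Prop := ∀ (sticks : List Int), Dom_max_frames sticks → Spec_max_frames sticks (max_frames sticks)

-- ===== LEMMAS AND PROOFS =====

-- the common value both loops compute: sum over distinct values of count // 2
def pairSum (l : List Int) : Int :=
  ((PySem.List.dedup l).map (fun k => PySem.Int.floordiv (l.count k : Int) 2)).sum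

def bFinal (st : Int × Int × Option Int) : Int := st.1 + PySem.Int.floordiv st.2.1 2

-- the pairs accumulator is a pure offset through the scan
theorem bStep_offset (l : List Int) (p r : Int) (prev : Option Int) (c : Int) :
    l.foldl bStep (p + c, r, prev)
      = ((l.foldl bStep (p, r, prev)).1 + c, (l.foldl bStep (p, r, prev)).2) := by
  induction l generalizing p r prev with
  | nil => rfl
  | cons y t ih =>
    simp only [List.foldl_cons, bStep]
    split_ifs with h
    · exact ih p (r + 1) prev
    · have := ih (p + PySem.Int.floordiv r 2) 1 (some y)
      simpa [add_comm, add_left_comm, add_assoc] using this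

-- a run of equal values just grows the run counter
theorem bStep_replicate (n : Nat) (p r : Int) (x : Int) (hr : 0 < r) :
    (List.replicate n x).foldl bStep (p, r, some x) = (p, r + n, some x) := by
  induction n generalizing r with
  | zero => simp
  | succ m ih =>
    simp only [List.replicate_succ, List.foldl_cons, bStep]
    split_ifs with h
    · have := ih (r + 1) (by omega)
      rw [this]; congr 2; push_cast; ring
    · exact absurd ⟨by omega, by trivial⟩ h

-- restarting the scan: a new value flushes the pending run
theorem bStep_restart (t : List Int) (y p r x : Int) (hyx : y ≠ x) :
    bFinal ((y :: t).foldl bStep (p, r, some x))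
      = p + PySem.Int.floordiv r 2 + bFinal (t.foldl bStep (0, 1, some y)) := by
  have hstep : bStep (p, r, some x) y = (p + PySem.Int.floordiv r 2, 1, some y) := by
    simp only [bStep]
    rw [if_neg]
    rintro ⟨-, h2⟩
    exact hyx (Option.some.inj h2).symm
  simp only [List.foldl_cons, hstep]
  have := bStep_offset t 0 1 (some y) (p + PySem.Int.floordiv r 2)
  simp only [zero_add] at this
  rw [this]
  simp [bFinal, add_comm, add_assoc]

theorem bFresh_eq (l : List Int) (y : Int) :
    (y :: l).foldl bStep (0, 0, none) = l.foldl bStep (0, 1, some y) := by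
  simp [List.foldl_cons, bStep, PySem.Int.floordiv]

-- pairSum is determined by the multiset of elements
theorem pairSum_perm (l l' : List Int) (h : l.Perm l') : pairSum l = pairSum l' := by
  unfold pairSum
  have hd : (PySem.List.dedup l).Perm (PySem.List.dedup l') := by
    rw [List.perm_ext_iff_of_nodup (PySem.List.nodup_dedup _) (PySem.List.nodup_dedup _)]
    intro a
    simp only [PySem.List.mem_dedup]
    exact ⟨fun ha => h.mem_iff.mp ha, fun ha => h.mem_iff.mpr ha⟩
  have hcount : ∀ k : Int, l.count k = l'.count k := fun k => h.count_eq k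
  calc ((PySem.List.dedup l).map (fun k => PySem.Int.floordiv (l.count k : Int) 2)).sum
      = ((PySem.List.dedup l).map (fun k => PySem.Int.floordiv (l'.count k : Int) 2)).sum := by
        simp only [hcount]
    _ = ((PySem.List.dedup l').map (fun k => PySem.Int.floordiv (l'.count k : Int) 2)).sum :=
        (hd.map _).sum_eq

-- decomposing a sorted list at its minimal head run
theorem pairSum_split (n : Nat) (x : Int) (rest : List Int) (hx : x ∉ rest) (hn : 0 < n) :
    pairSum (List.replicate n x ++ rest)
      = PySem.Int.floordiv (n : Int) 2 + pairSum rest := by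
  unfold pairSum
  set l := List.replicate n x ++ rest with hl
  have hcx : l.count x = n := by
    simp [hl, List.count_append, List.count_eq_zero_of_not_mem hx]
  have hck : ∀ k : Int, k ≠ x → l.count k = rest.count k := by
    intro k hk
    simp [hl, List.count_append, List.count_replicate]
    exact fun h => absurd h.symm hk
  have hmem : ∀ a : Int, a ∈ PySem.List.dedup l ↔ a = x ∨ a ∈ PySem.List.dedup rest := by
    intro a
    simp [hl, List.mem_append, List.mem_replicate, hn.ne']
  have hperm : (PySem.List.dedup l).Perm (x :: PySem.List.dedup rest) := by
    rw [List.perm_ext_iff_of_nodup (PySem.List.nodup_dedup _)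
      (List.nodup_cons.mpr ⟨by simpa [PySem.List.mem_dedup] using hx, PySem.List.nodup_dedup _⟩)]
    intro a
    rw [hmem a]; simp
  calc ((PySem.List.dedup l).map (fun k => PySem.Int.floordiv (l.count k : Int) 2)).sum
      = ((x :: PySem.List.dedup rest).map (fun k => PySem.Int.floordiv (l.count k : Int) 2)).sum :=
        (hperm.map _).sum_eq
    _ = PySem.Int.floordiv (n : Int) 2
        + ((PySem.List.dedup rest).map (fun k => PySem.Int.floordiv (l.count k : Int) 2)).sum := by
        simp [hcx]
    _ = PySem.Int.floordiv (n : Int) 2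
        + ((PySem.List.dedup rest).map (fun k => PySem.Int.floordiv (rest.count k : Int) 2)).sum := by
        congr 1
        apply congrArg List.sum
        apply List.map_congr_left
        intro k hk
        have hkx : k ≠ x := by
          intro h; subst h
          simp at hk
          exact hx hk
        rw [hck k hkx]

-- a sorted list starts with a replicate-run of its head, head absent from the rest
theorem sorted_head_run (x : Int) (t : List Int) (hs : (x :: t).Pairwise (· ≤ ·)) :
    ∃ (n : Nat) (rest : List Int), 0 < n ∧ x :: t = List.replicate n x ++ rest ∧
      x ∉ rest ∧ rest.Pairwise (· ≤ ·) ∧ rest.length < (x :: t).length := by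
  set l := x :: t with hl
  set tw := l.takeWhile (fun y => decide (y = x)) with htw
  set rest := l.dropWhile (fun y => decide (y = x)) with hrest
  have hsplit : l = tw ++ rest := (List.takeWhile_append_dropWhile).symm
  have htwrep : tw = List.replicate tw.length x := by
    apply List.eq_replicate_of_mem
    intro a ha
    have := List.mem_takeWhile_imp ha
    simpa using this
  have hxrest : x ∉ rest := by
    intro hmem
    rcases hr : rest with _ | ⟨z, rs⟩
    · rw [hr] at hmem; exact absurd hmem (List.not_mem_nil)
    · have hz : ¬ (z = x) := by
        have := List.head?_dropWhile_not (fun y => decide (y = x)) l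
        rw [← hrest, hr] at this
        simpa using this
      have hrp : rest.Pairwise (· ≤ ·) := by
        rw [hsplit] at hs
        exact hs.sublist (List.sublist_append_right _ _)
      have hzle : ∀ a ∈ rs, z ≤ a := by
        rw [hr] at hrp
        exact fun a ha => (List.pairwise_cons.mp hrp).1 a ha
      have hxle : x ≤ z := by
        -- z ∈ l and x is the head of the sorted l
        have hzl : z ∈ l := by rw [hsplit, hr]; simp
        rw [hl] at hzl hs
        rcases List.mem_cons.mp hzl with h | h
        · exact absurd h hz
        · exact (List.pairwise_cons.mp hs).1 z h
      rw [hr] at hmem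
      rcases List.mem_cons.mp hmem with h | h
      · exact hz h.symm
      · have := hzle x h
        omega
  have hlen : 0 < tw.length := by
    rcases htw' : tw with _ | ⟨a, as⟩
    · exfalso
      have : l = rest := by rw [hsplit, htw']; rfl
      apply hxrest; rw [← this, hl]; simp
    · simp
  refine ⟨tw.length, rest, hlen, by rw [← htwrep]; exact hsplit, hxrest, ?_, ?_⟩
  · rw [hsplit] at hs
    exact hs.sublist (List.sublist_append_right _ _)
  · have h2 : l.length = tw.length + rest.length := by rw [hsplit]; simp
    omega

-- main loop invariant: the scan over a sorted list computes pairSum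
theorem scan_eq_pairSum (l : List Int) (hs : l.Pairwise (· ≤ ·)) :
    bFinal (l.foldl bStep (0, 0, none)) = pairSum l := by
  induction hn : l.length using Nat.strong_induction_on generalizing l with
  | _ N ih =>
  rcases l with _ | ⟨x, t⟩
  · simp [bFinal, pairSum, PySem.List.dedup, PySem.Int.floordiv]
  · obtain ⟨n, rest, hnpos, hdecomp, hxr, hrs, hlt⟩ := sorted_head_run x t hs
    have hrep : x :: t = x :: (List.replicate (n - 1) x ++ rest) := by
      rw [hdecomp]
      rcases n with _ | m
      · omega
      · simp [List.replicate_succ]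
    rw [hrep, bFresh_eq]
    rw [List.foldl_append]
    rw [bStep_replicate (n - 1) 0 1 x (by omega)]
    have hrun : (1 : Int) + ((n - 1 : Nat) : Int) = (n : Int) := by
      push_cast [Nat.cast_sub (by omega : 1 ≤ n)]; ring
    rw [hrun]
    have hps : pairSum (x :: t) = PySem.Int.floordiv (n : Int) 2 + pairSum rest := by
      rw [hdecomp]; exact pairSum_split n x rest hxr hnpos
    rcases rest with _ | ⟨y, rt⟩
    · have hnil : pairSum ([] : List Int) = 0 := rfl
      rw [← hrep, hps, hnil]
      simp [bFinal]
    · have hyx : y ≠ x := fun h => hxr (h ▸ List.mem_cons_self)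
      rw [bStep_restart rt y 0 (n : Int) x hyx]
      rw [← bFresh_eq rt y]
      have hrest_eq : bFinal ((y :: rt).foldl bStep (0, 0, none)) = pairSum (y :: rt) := by
        subst hn
        exact ih (y :: rt).length hlt (y :: rt) hrs rfl
      rw [hrest_eq, ← hrep, hps]
      ring

-- A's loop: the pairs component is the sum of count // 2 over distinct values
theorem foldl_pair_fst (l : List (Int × Int)) (p s : Int) :
    (l.foldl (fun (acc : Int × Int) kv =>
      (acc.1 + PySem.Int.floordiv kv.2 2, acc.2 + PySem.Int.floordiv kv.2 4)) (p, s)).1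
      = p + (l.map (fun kv => PySem.Int.floordiv kv.2 2)).sum := by
  induction l generalizing p s with
  | nil => simp
  | cons kv t ih =>
    simp only [List.foldl_cons, List.map_cons, List.sum_cons]
    rw [ih]
    ring

theorem maxA_eq (sticks : List Int) :
    max_frames sticks = PySem.Int.floordiv (pairSum sticks) 2 := by
  unfold max_frames
  simp only [PySem.Dict.items_counter]
  rw [foldl_pair_fst]
  simp only [zero_add, pairSum, List.map_map]
  rw [← PySem.List.dedup_eq_ofList]
  rfl

theorem maxB_eq (sticks : List Int) :
    max_frames_alt sticks = PySem.Int.floordiv (pairSum sticks) 2 := by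
  show PySem.Int.floordiv
      ((List.foldl bStep (0, 0, none) (PySem.List.sorted sticks (fun x => x) false)).1
        + PySem.Int.floordiv
            (List.foldl bStep (0, 0, none) (PySem.List.sorted sticks (fun x => x) false)).2.1 2) 2
    = PySem.Int.floordiv (pairSum sticks) 2
  have hsp : (PySem.List.sorted sticks (fun x => x) false).Pairwise (· ≤ ·) := by
    simpa using PySem.List.sorted_pairwise sticks (fun x => x)
  have := scan_eq_pairSum (PySem.List.sorted sticks (fun x => x) false) hsp
  simp only [bFinal] at this
  rw [this]
  congr 1
  exact pairSum_perm _ _ (PySem.List.sorted_perm sticks (fun x => x) false)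

-- ===== VERDICT (by name: the statement is the Claim_ definition above) =====
theorem max_frames_spec : Claim_equal_max_frames := by
  intro sticks _
  unfold Spec_max_frames
  rw [maxA_eq, maxB_eq]
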